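-- pv_equiv track=rewrite | github.com/pypi-data/pypi-mirror-168 | packages/randomlib/randomlib-0.9-py3-none-any.whl/randomlib/tokenizer/tokenize.py | word_tokenize_mr
-- ===== SOURCE A (Python) =====
-- def word_tokenize_mr(txt, punctuation):
--     punc = '''!()-[]{};:'"\,<>./?@#$%^&*_~'''
--     if punctuation:
--         str = ""
--         tokens = []
--         for ele in txt:
--             if ele in punc:
--                 if str:
--                     tokens.append(str)
--                     str = ""
--                 tokens.append(ele)
--             elif ele == " ":
--                 if str:
--                     tokens.append(str)
--                     str = ""
--             else:
--                 str += ele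
--         if str:
--             tokens.append(str)
--             str = ""
--         return tokens
--     else:
--         for ele in txt:
--             if ele in punc:
--                 txt = txt.replace(ele, " ")
--         x = txt.split()
--         return x
-- ===== SOURCE B (Python) =====
-- def word_tokenize_mr(txt, punctuation):
--     punc = '''!()-[]{};:'"\,<>./?@#$%^&*_~'''
--     if punctuation:
--         # index scan over maximal runs instead of a char-by-char accumulator
--         tokens = []
--         i, n = 0, len(txt)
--         while i < n:
--             c = txt[i]
--             if c in punc:
--                 tokens.append(c)
--                 i += 1
--             elif c == " ":
--                 i += 1
--             else:
--                 j = i + 1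
--                 while j < n and txt[j] not in punc and txt[j] != " ":
--                     j += 1
--                 tokens.append(txt[i:j])
--                 i = j
--         return tokens
--     else:
--         # one translation pass instead of repeated str.replace calls
--         return "".join(" " if c in punc else c for c in txt).split()
-- ===== Notes on version B (the rewrite author's own statement) =====
-- stated objective: simpler
-- what changed: The keep-punctuation branch is rewritten as an index scan over maximal word runs (inner while + slice) instead of A's char-by-char accumulator with flushing, and the drop-punctuation branch becomes a single join/translate pass plus split() instead of A's loop of repeated str.replace calls.
import Mathlib
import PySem

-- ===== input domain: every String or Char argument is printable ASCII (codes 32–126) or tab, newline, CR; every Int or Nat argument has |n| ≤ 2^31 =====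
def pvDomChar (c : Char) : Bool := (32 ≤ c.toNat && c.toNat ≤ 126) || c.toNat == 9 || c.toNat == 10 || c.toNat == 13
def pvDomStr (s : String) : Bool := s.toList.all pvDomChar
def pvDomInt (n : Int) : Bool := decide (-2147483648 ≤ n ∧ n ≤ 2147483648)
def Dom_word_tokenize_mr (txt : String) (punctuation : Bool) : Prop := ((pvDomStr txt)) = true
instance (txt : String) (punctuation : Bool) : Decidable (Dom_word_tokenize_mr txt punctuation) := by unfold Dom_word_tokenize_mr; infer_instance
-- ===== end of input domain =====

-- B replaces A's char-by-char accumulator loop by a maximal-run index scan (keep-punctuation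
-- branch) and A's repeated str.replace loop by a single translation pass (drop branch); objective: simpler.


-- ===== PORT A =====
-- the Python punc literal ('\,' is a literal backslash followed by a comma)
def pvPunc : List Char :=
  ['!', '(', ')', '-', '[', ']', '{', '}', ';', ':', '\'', '"', '\\', ',',
   '<', '>', '.', '/', '?', '@', '#', '$', '%', '^', '&', '*', '_', '~']

-- the accumulator loop of A's True branch: state (str, tokens), returned for the final flush
def pvALoop : List Char → List Char → List String → List Char × List String
  | [], str, tokens => (str, tokens)
  | e :: rest, str, tokens =>
    if e ∈ pvPunc then
      pvALoop rest [] ((if str ≠ [] then tokens ++ [String.mk str] else tokens) ++ [String.mk [e]])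
    else if e = ' ' then
      pvALoop rest [] (if str ≠ [] then tokens ++ [String.mk str] else tokens)
    else
      pvALoop rest (str ++ [e]) tokens

-- the replace loop of A's False branch: iterates over the ORIGINAL txt (Python's loop iterator
-- holds the original string object), rebinding txt via txt.replace(ele, " ")
def pvAReplLoop : List Char → List Char → List Char
  | [], t => t
  | e :: rest, t =>
    pvAReplLoop rest (if e ∈ pvPunc then PySem.Chars.replace t [e] [' '] else t)

def word_tokenize_mr (txt : String) (punctuation : Bool) : List String :=
  if punctuation then
    let st := pvALoop txt.toList [] []
    if st.1 ≠ [] then st.2 ++ [String.mk st.1] else st.2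
  else
    (PySem.Chars.split₀ (pvAReplLoop txt.toList txt.toList)).map String.mk

-- ===== PORT B =====
def pvWordChar (c : Char) : Bool := c ∉ pvPunc && c ≠ ' '

-- B's True branch: scan by maximal runs (inner while = takeWhile/dropWhile over the rest)
def pvBScan : List Char → List String
  | [] => []
  | c :: rest =>
    if c ∈ pvPunc then String.mk [c] :: pvBScan rest
    else if c = ' ' then pvBScan rest
    else String.mk (c :: rest.takeWhile pvWordChar) :: pvBScan (rest.dropWhile pvWordChar)
  termination_by l => l.length
  decreasing_by
    · simp
    · simp
    · have := List.length_dropWhile_le pvWordChar rest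
      simp; omega

def word_tokenize_mr_alt (txt : String) (punctuation : Bool) : List String :=
  if punctuation then
    pvBScan txt.toList
  else
    (PySem.Chars.split₀ (txt.toList.map (fun c => if c ∈ pvPunc then ' ' else c))).map String.mk

-- ===== PRECONDITION & SPEC =====
def Spec_word_tokenize_mr (txt : String) (punctuation : Bool) (out : List String) : Prop := out = word_tokenize_mr_alt txt punctuation
instance (txt : String) (punctuation : Bool) (out : List String) : Decidable (Spec_word_tokenize_mr txt punctuation out) := by unfold Spec_word_tokenize_mr; infer_instance

-- ===== CLAIM (what is proved, stated in full; the proofs are below) =====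
def Claim_equal_word_tokenize_mr : Prop := ∀ (txt : String) (punctuation : Bool), Dom_word_tokenize_mr txt punctuation → Spec_word_tokenize_mr txt punctuation (word_tokenize_mr txt punctuation)

-- ===== LEMMAS AND PROOFS =====

-- str.replace(e, " ") for a single char e maps every occurrence of e to ' '
theorem replace_go_single (e : Char) :
    ∀ (l : List Char) (fuel : Nat) (acc : List Char), l.length ≤ fuel →
      PySem.Chars.replace.go [e] [' '] fuel l acc
        = acc.reverse ++ l.map (fun c => if c = e then ' ' else c) := by
  intro l
  induction l with
  | nil =>
    intro fuel acc _
    cases fuel <;> simp [PySem.Chars.replace.go]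
  | cons c t ih =>
    intro fuel acc h
    cases fuel with
    | zero => simp at h
    | succ f =>
      by_cases hc : c = e
      · subst hc
        have hpre : [c].isPrefixOf (c :: t) = true := by simp [List.isPrefixOf]
        simp only [PySem.Chars.replace.go, hpre, if_pos]
        have hdrop : List.drop [c].length (c :: t) = t := rfl
        rw [hdrop, ih f _ (by simpa using h)]
        simp
      · have hpre : [e].isPrefixOf (c :: t) = false := by
          simp [List.isPrefixOf]; exact fun hh => (hc hh.symm).elim
        simp only [PySem.Chars.replace.go, hpre]
        rw [if_neg (by simp), ih f _ (by simpa using h)]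
        simp [hc]

theorem replace_single (e : Char) (t : List Char) :
    PySem.Chars.replace t [e] [' '] = t.map (fun c => if c = e then ' ' else c) := by
  simp only [PySem.Chars.replace, List.isEmpty_cons, Bool.false_eq_true, if_false]
  simpa using replace_go_single e t t.length [] le_rfl

-- the whole replace loop is one translation pass over chars of punc seen so far
theorem pvAReplLoop_eq (L : List Char) :
    ∀ t : List Char, pvAReplLoop L t
      = t.map (fun c => if c ∈ pvPunc ∧ c ∈ L then ' ' else c) := by
  induction L with
  | nil => intro t; simp [pvAReplLoop]
  | cons e rest ih =>
    intro t
    by_cases he : e ∈ pvPunc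
    · simp only [pvAReplLoop, if_pos he, replace_single, ih, List.map_map]
      apply List.map_congr_left
      intro c _
      by_cases hc : c = e
      · subst hc
        have : (' ' : Char) ∉ pvPunc := by decide
        simp [he, this]
      · by_cases hcp : c ∈ pvPunc <;> simp [Function.comp, hc, hcp]
    · simp only [pvAReplLoop, if_neg he, ih]
      apply List.map_congr_left
      intro c _
      by_cases hc : c = e
      · subst hc; simp [he]
      · simp [hc]

-- A's accumulator loop + final flush equals B's run scan, with a pending word str merged into
-- the leading word-run of the remaining input
theorem pvALoop_eq (L : List Char) :
    ∀ (str : List Char) (tokens : List String),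
      (if (pvALoop L str tokens).1 ≠ [] then
          (pvALoop L str tokens).2 ++ [String.mk (pvALoop L str tokens).1]
        else (pvALoop L str tokens).2)
      = tokens ++
          (if str = [] then pvBScan L
           else String.mk (str ++ L.takeWhile pvWordChar) :: pvBScan (L.dropWhile pvWordChar)) := by
  induction L with
  | nil =>
    intro str tokens
    by_cases hs : str = [] <;> simp [pvALoop, pvBScan, hs]
  | cons e rest ih =>
    intro str tokens
    by_cases hp : e ∈ pvPunc
    · have hw : pvWordChar e = false := by simp [pvWordChar, hp]
      rw [show pvALoop (e :: rest) str tokens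
            = pvALoop rest []
                ((if str ≠ [] then tokens ++ [String.mk str] else tokens) ++ [String.mk [e]])
          from by simp [pvALoop, hp]]
      rw [ih]
      by_cases hs : str = []
      · simp [hs, pvBScan, hp]
      · simp [hs, pvBScan, hp, hw]
    · by_cases hsp : e = ' '
      · subst hsp
        rw [show pvALoop (' ' :: rest) str tokens
              = pvALoop rest [] (if str ≠ [] then tokens ++ [String.mk str] else tokens)
            from by simp [pvALoop, hp]]
        rw [ih]
        have hw : pvWordChar ' ' = false := by decide
        by_cases hs : str = []
        · simp [hs, pvBScan, hp]
        · simp [hs, pvBScan, hp, hw]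
      · have hw : pvWordChar e = true := by simp [pvWordChar, hp, hsp]
        rw [show pvALoop (e :: rest) str tokens = pvALoop rest (str ++ [e]) tokens
            from by simp [pvALoop, hp, hsp]]
        rw [ih]
        have hne : ¬ (str ++ [e] = []) := by simp
        rw [if_neg hne]
        by_cases hs : str = []
        · subst hs
          simp [pvBScan, hp, hsp]
        · simp [hs, hw]

-- ===== VERDICT (by name: the statement is the Claim_ definition above) =====
theorem word_tokenize_mr_spec : Claim_equal_word_tokenize_mr := by
  intro txt punctuation _
  unfold Spec_word_tokenize_mr word_tokenize_mr word_tokenize_mr_alt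
  cases punctuation
  · simp only [if_neg Bool.false_ne_true]
    rw [pvAReplLoop_eq]
    congr 1
    apply congrArg
    apply List.map_congr_left
    intro c hc
    by_cases hcp : c ∈ pvPunc <;> simp [hcp, hc]
  · simpa using pvALoop_eq txt.toList [] []
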